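-- pv_equiv track=rewrite | github.com/Snooz82/robotframework-debugger | src/Debugger/__init__.py | is_modifier_used
-- ===== SOURCE A (Python) =====
-- def is_modifier_used(state, modifier):
--     if isinstance(state, int):
--         mods = ('Shift', 'Lock', 'Control',
--                 'Mod1', 'Mod2', 'Mod3', 'Mod4', 'Mod5',
--                 'Button1', 'Button2', 'Button3', 'Button4', 'Button5')
--         s = []
--         for i, n in enumerate(mods):
--             if state & (1 << i):
--                 s.append(n)
--         state = state & ~((1 << len(mods)) - 1)
--         if state or not s:
--             s.append(hex(state))
--         if modifier in s:
--             return True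
--     return False
-- ===== SOURCE B (Python) =====
-- def is_modifier_used(state, modifier):
--     if not isinstance(state, int):
--         return False
--     mods = ('Shift', 'Lock', 'Control',
--             'Mod1', 'Mod2', 'Mod3', 'Mod4', 'Mod5',
--             'Button1', 'Button2', 'Button3', 'Button4', 'Button5')
--     if modifier in mods:
--         return bool(state & (1 << mods.index(modifier)))
--     leftover = state & ~((1 << 13) - 1)
--     has_name = any(state & (1 << i) for i in range(13))
--     if leftover or not has_name:
--         return modifier == hex(leftover)
--     return False
-- ===== Notes on version B (the rewrite author's own statement) =====
-- stated objective: simpler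
-- what changed: B drops A's intermediate name-list construction and membership scan: it looks the modifier up in the mods tuple and tests that bit directly, and otherwise compares the modifier against hex(leftover) under the same append condition.
import Mathlib
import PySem

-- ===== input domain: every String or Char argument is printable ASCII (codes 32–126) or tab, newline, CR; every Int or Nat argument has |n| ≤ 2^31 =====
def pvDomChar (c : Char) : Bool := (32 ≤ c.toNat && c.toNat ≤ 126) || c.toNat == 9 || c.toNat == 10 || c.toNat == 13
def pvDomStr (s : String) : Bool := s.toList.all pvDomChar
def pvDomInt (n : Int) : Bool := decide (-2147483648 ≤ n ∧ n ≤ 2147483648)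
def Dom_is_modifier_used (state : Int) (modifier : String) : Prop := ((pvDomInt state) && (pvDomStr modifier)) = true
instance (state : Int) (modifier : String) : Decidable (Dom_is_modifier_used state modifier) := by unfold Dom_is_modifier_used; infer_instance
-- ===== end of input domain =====

-- B replaces A's build-a-list-then-test-membership with a direct decision: look the
-- modifier up in the name tuple and test its bit, else compare against hex(leftover).
-- Objective: simpler (no intermediate list); equivalence is about the return value (no mutation).

-- ===== PORT A =====

-- hand port of Python's hex(): '0x…' lowercase digits, '-0x…' for negatives (exact for all ints)
def pyHexDigit (n : Nat) : Char :=
  if n < 10 then Char.ofNat (48 + n) else Char.ofNat (87 + n)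

def pyHexDigits : Nat → List Char
  | 0 => []
  | n + 1 => pyHexDigits ((n + 1) / 16) ++ [pyHexDigit ((n + 1) % 16)]
decreasing_by omega

def pyHex (n : Int) : String :=
  if n < 0 then String.ofList ('-' :: '0' :: 'x' :: pyHexDigits (-n).toNat)
  else if n = 0 then String.ofList ['0', 'x', '0']
  else String.ofList ('0' :: 'x' :: pyHexDigits n.toNat)

def pvMods : List String :=
  ["Shift", "Lock", "Control",
   "Mod1", "Mod2", "Mod3", "Mod4", "Mod5",
   "Button1", "Button2", "Button3", "Button4", "Button5"]

def is_modifier_used (state : Int) (modifier : String) : Bool :=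
  -- the enumerate index is nonnegative, so .toNat is exact for the shift amount
  let s : List String := (PySem.List.enumerate pvMods).foldl
    (fun s p => if PySem.Int.band state ((1 : Int) <<< p.1.toNat) ≠ 0 then s ++ [p.2] else s) []
  let state2 := PySem.Int.band state (Int.not ((1 <<< pvMods.length) - 1))
  let s2 := if state2 ≠ 0 ∨ s = [] then s ++ [pyHex state2] else s
  s2.contains modifier

-- ===== PORT B =====

def is_modifier_used_alt (state : Int) (modifier : String) : Bool :=
  match PySem.List.index? pvMods modifier with
  | some i => PySem.Int.band state ((1 : Int) <<< i) != 0
  | none =>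
    let leftover := PySem.Int.band state (Int.not ((1 <<< 13) - 1))
    let has_name := (PySem.List.pyRange 0 13 1).any
      (fun i => PySem.Int.band state ((1 : Int) <<< i.toNat) != 0)
    if leftover ≠ 0 ∨ has_name = false then modifier == pyHex leftover else false

-- ===== PRECONDITION & SPEC =====
def Spec_is_modifier_used (state : Int) (modifier : String) (out : Bool) : Prop := out = is_modifier_used_alt state modifier
instance (state : Int) (modifier : String) (out : Bool) : Decidable (Spec_is_modifier_used state modifier out) := by unfold Spec_is_modifier_used; infer_instance

-- ===== CLAIM (what is proved, stated in full; the proofs are below) =====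
def Claim_equal_is_modifier_used : Prop := ∀ (state : Int) (modifier : String), Dom_is_modifier_used state modifier → Spec_is_modifier_used state modifier (is_modifier_used state modifier)

-- ===== LEMMAS AND PROOFS =====

theorem pvMods_length : pvMods.length = 13 := rfl

-- hex strings start with '-' or '0', so they never collide with a modifier name
theorem pyHex_head (n : Int) :
    (pyHex n).toList.head? = some '-' ∨ (pyHex n).toList.head? = some '0' := by
  unfold pyHex
  split_ifs <;> simp [String.toList_ofList]

theorem pyHex_ne (n : Int) (s : String)
    (h : s.toList.head? ≠ some '-' ∧ s.toList.head? ≠ some '0') : pyHex n ≠ s := by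
  intro he
  rcases pyHex_head n with h0 | h0 <;> rw [he] at h0 <;> simp [h0] at h

theorem pvName_ne_pyHex (s : String) (n : Int) (h : s ∈ pvMods) : ¬ (s = pyHex n) := by
  intro he
  exact pyHex_ne n s (by fin_cases h <;> exact ⟨by decide, by decide⟩) he.symm

-- the names appended by A's loop all come from the mods tuple
theorem pvSub (f : Int → Bool) (tl : List String) (j : Int) (m : String)
    (h : m ∈ (List.filter (fun x => f x.1) (PySem.List.enumerate tl j)).map Prod.snd) : m ∈ tl := by
  rcases List.mem_map.mp h with ⟨x, hx, rfl⟩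
  have h1 := (List.mem_filter.mp hx).1
  have h2 : x.2 ∈ (PySem.List.enumerate tl j).map (fun x => x.2) := List.mem_map_of_mem h1
  rwa [PySem.List.map_snd_enumerate] at h2

-- membership in A's filtered name list = the bit of the name's first index is set
theorem pvL1 (f : Int → Bool) (ns : List String) (k : Int) (m : String) (hnd : ns.Nodup) :
    (m ∈ (List.filter (fun x => f x.1) (PySem.List.enumerate ns k)).map Prod.snd
      ↔ ∃ i : Nat, List.idxOf? m ns = some i ∧ f (k + i) = true) := by
  induction ns generalizing k with
  | nil => simp [PySem.List.enumerate_nil]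
  | cons n tl ih =>
    rw [PySem.List.enumerate_cons]
    rcases List.nodup_cons.mp hnd with ⟨hn, hnd'⟩
    by_cases hm : m = n
    · subst hm
      have hnotF : m ∉ (List.filter (fun x => f x.1) (PySem.List.enumerate tl (k+1))).map Prod.snd :=
        fun h => hn (pvSub f tl (k+1) m h)
      rw [List.filter_cons, List.idxOf?_cons, if_pos (show (m == m) = true by simp)]
      split_ifs with hf <;> simp [hnotF, hf]
    · have hne : (n == m) = false := by simp [Ne.symm hm]
      rw [List.filter_cons, List.idxOf?_cons, hne]
      have hswap : ∀ L : List (Int × String),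
          (m ∈ (if f k then ((k, n) :: L) else L).map Prod.snd ↔ m ∈ L.map Prod.snd) := by
        intro L; split_ifs <;> simp [hm]
      rw [hswap, ih (k+1) hnd']
      constructor
      · rintro ⟨j, hj, hf'⟩
        exact ⟨j + 1, by simp [hj], by rw [show k + (↑(j+1) : Int) = k + 1 + ↑j by push_cast; ring]; exact hf'⟩
      · rintro ⟨i, hi, hf'⟩
        rcases Option.map_eq_some_iff.mp hi with ⟨j, hj, rfl⟩
        exact ⟨j, hj, by rw [show k + 1 + (↑j : Int) = k + ↑(j+1) by push_cast; ring]; exact hf'⟩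

-- A's name list is empty iff no low bit is set (B's has_name test)
theorem pvEmpty_iff (f g : Int → Bool) (ns : List String) (hfg : ∀ j : Int, f j = g j) :
    ((List.filter (fun x => f x.1) (PySem.List.enumerate ns)).map Prod.snd = []
      ↔ (PySem.List.pyRange 0 (PySem.List.len ns)).any g = false) := by
  rw [List.map_eq_nil_iff, List.filter_eq_nil_iff, List.any_eq_false,
    PySem.List.enumerate_eq_map_pyRange ns ""]
  simp only [List.forall_mem_map]
  exact forall₂_congr (fun j _ => by rw [hfg j])

-- ===== VERDICT (by name: the statement is the Claim_ definition above) =====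
theorem is_modifier_used_spec : Claim_equal_is_modifier_used := by
  intro state modifier _
  unfold Spec_is_modifier_used is_modifier_used is_modifier_used_alt
  rw [PySem.List.foldl_append_ite, PySem.List.index?_eq_idxOf?]
  simp only [List.nil_append, pvMods_length, List.contains_eq_mem]
  have hfg : ∀ j : Int, (decide (PySem.Int.band state ((1 : Int) <<< ((j.toNat : Nat) : Int)) ≠ 0))
      = (PySem.Int.band state ((1 : Int) <<< j.toNat) != 0) := by
    intro j
    rw [Int.shiftLeft_natCast_right, Bool.eq_iff_iff]
    simp [bne_iff_ne]
  have hEmp : (List.map Prod.snd (List.filter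
        (fun x => decide (PySem.Int.band state ((1 : Int) <<< ((x.1.toNat : Nat) : Int)) ≠ 0))
        (PySem.List.enumerate pvMods)) = [])
      ↔ ((PySem.List.pyRange 0 13 1).any
        (fun i => PySem.Int.band state ((1 : Int) <<< i.toNat) != 0) = false) :=
    pvEmpty_iff _ _ pvMods hfg
  rcases hidx : List.idxOf? modifier pvMods with _ | i
  · have hm : modifier ∉ pvMods := List.idxOf?_eq_none_iff.mp hidx
    have hL : modifier ∉ (List.filter
        (fun x => decide (PySem.Int.band state ((1 : Int) <<< ((x.1.toNat : Nat) : Int)) ≠ 0))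
        (PySem.List.enumerate pvMods)).map Prod.snd :=
      fun h => hm (pvSub (fun j : Int => decide (PySem.Int.band state ((1 : Int) <<< (j.toNat : Int)) ≠ 0)) pvMods 0 modifier h)
    rw [Bool.eq_iff_iff]
    split_ifs with hC hC' hC'
    · rw [decide_eq_true_iff]
      simp only [List.mem_append, List.mem_singleton, beq_iff_eq]
      exact ⟨fun h => h.resolve_left (fun h' => absurd h' hL), fun h => Or.inr h⟩
    · exact absurd (Or.imp_right hEmp.mp hC) hC'
    · exact absurd (Or.imp_right hEmp.mpr hC') hC
    · simp only [decide_eq_true_iff, iff_false]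
      exact hL
  · have hm : modifier ∈ pvMods := by
      by_contra h
      rw [List.idxOf?_eq_none_iff.mpr h] at hidx
      cases hidx
    have hmemL : modifier ∈ (List.filter
        (fun x => decide (PySem.Int.band state ((1 : Int) <<< ((x.1.toNat : Nat) : Int)) ≠ 0))
        (PySem.List.enumerate pvMods)).map Prod.snd
        ↔ PySem.Int.band state ((1 : Int) <<< i) ≠ 0 := by
      constructor
      · intro h
        obtain ⟨j, hj, hf⟩ := (pvL1 (fun j : Int => decide (PySem.Int.band state ((1 : Int) <<< (j.toNat : Int)) ≠ 0)) pvMods 0 modifier (by decide)).mp h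
        rw [hidx] at hj
        cases hj
        rw [show ((0 : Int) + (i : Int)).toNat = i by simp, Int.shiftLeft_natCast_right] at hf
        exact of_decide_eq_true hf
      · intro hb
        refine (pvL1 (fun j : Int => decide (PySem.Int.band state ((1 : Int) <<< (j.toNat : Int)) ≠ 0)) pvMods 0 modifier (by decide)).mpr ⟨i, hidx, ?_⟩
        rw [show ((0 : Int) + (i : Int)).toNat = i by simp, Int.shiftLeft_natCast_right]
        exact decide_eq_true hb
    have hhex : ¬ (modifier = pyHex (PySem.Int.band state (Int.not ((1 <<< (13 : Nat) : Int) - 1)))) :=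
      pvName_ne_pyHex modifier _ hm
    simp only [hidx]
    rw [Bool.eq_iff_iff]
    split_ifs with hC
    · simp only [List.mem_append, List.mem_singleton, bne_iff_ne, decide_eq_true_iff]
      constructor
      · rintro (h | h)
        · exact hmemL.mp h
        · exact absurd h hhex
      · exact fun hb => Or.inl (hmemL.mpr hb)
    · simp only [bne_iff_ne, decide_eq_true_iff]
      exact ⟨fun h => hmemL.mp h, fun hb => hmemL.mpr hb⟩
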